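-- pv_equiv track=rewrite | github.com/Ikromalieva-Sabokhat/mathematics | merge_words.py | merge_words
-- ===== SOURCE A (Python) =====
-- def merge_words(word1, word2):
--     i = -1
--     j = 1
--     k = 0
--     stop = min(len(word1), len(word2))
--     while stop >= k:
--         if word1[i:] == word2[:j]:
--             bir_xil = word1[i:]
--         i -= 1
--         j += 1
--         k += 1
--     return word1[:len(word1) - len(bir_xil)] + bir_xil + word2[len(bir_xil):]
-- ===== SOURCE B (Python) =====
-- def merge_words(word1, word2):
--     # scan shifts upward from the largest possible overlap; first success = longest overlap
--     s = max(0, len(word1) - len(word2))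
--     while s < len(word1):
--         if word2.startswith(word1[s:]):
--             return word1[:s] + word2
--         s += 1
--     if word1 or word2:
--         raise ValueError("the words do not overlap")
--     return word2
-- ===== Notes on version B (the rewrite author's own statement) =====
-- stated objective: faster
-- what changed: A scans every overlap length upward with negative-index slicing and keeps the last full slice match; B scans shifts upward from the largest possible overlap and returns at the first startswith success, and raises a deliberate ValueError on the non-overlapping inputs where A dies with NameError on the unbound bir_xil.
import Mathlib
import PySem

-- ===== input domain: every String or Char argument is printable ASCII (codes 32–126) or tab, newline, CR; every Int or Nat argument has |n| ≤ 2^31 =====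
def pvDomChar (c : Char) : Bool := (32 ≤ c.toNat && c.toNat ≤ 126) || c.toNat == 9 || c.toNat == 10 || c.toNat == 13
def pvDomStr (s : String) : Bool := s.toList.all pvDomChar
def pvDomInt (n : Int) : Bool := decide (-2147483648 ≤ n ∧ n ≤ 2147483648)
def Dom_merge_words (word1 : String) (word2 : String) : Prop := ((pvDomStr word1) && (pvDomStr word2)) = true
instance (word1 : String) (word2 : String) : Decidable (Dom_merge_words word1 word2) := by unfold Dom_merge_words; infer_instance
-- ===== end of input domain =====

-- B replaces A's scan over all overlap lengths (keeping the last slice match) by an upward scan of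
-- shifts that returns at the first startswith success; equivalence is proved on Pre_ (where A returns).


-- ===== PORT A =====
-- the while loop; fuel = stop + 1 - k, so the `k ≤ stop` guard is exact
def mwAloop (w1 w2 : List Char) (stop : Nat) (i j k : Int) (bir : Option (List Char)) : Nat → Option (List Char)
  | 0 => bir
  | f + 1 =>
    if k ≤ (stop : Int) then
      mwAloop w1 w2 stop (i - 1) (j + 1) (k + 1)
        (if PySem.List.slice w1 (some i) none = PySem.List.slice w2 none (some j)
         then some (PySem.List.slice w1 (some i) none) else bir) f
    else bir

def merge_words (word1 : String) (word2 : String) : String :=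
  let w1 := word1.toList
  let w2 := word2.toList
  let stop := min w1.length w2.length
  match mwAloop w1 w2 stop (-1) 1 0 none (stop + 1) with
  | some bir =>
      String.ofList (PySem.List.slice w1 none (some ((w1.length : Int) - (bir.length : Int)))
        ++ bir ++ PySem.List.slice w2 (some ((bir.length : Int))) none)
  | none => ""   -- Python raises NameError (bir_xil unbound) here; excluded by Pre_

-- ===== PORT B =====
-- the while loop; `word1[s:]` with 0 ≤ s is `List.drop s` (PySem.List.slice_from_natCast);
-- `some s` is the early `return word1[:s] + word2` at shift s, `none` means the loop ran out;
-- fuel = len(word1) + 1 - s is enough, the `s < len(word1)` guard is what stops the loop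
def mwBloop (w1 w2 : List Char) (s : Nat) : Nat → Option Nat
  | 0 => none
  | f + 1 =>
    if s < w1.length then
      if PySem.Chars.startswith w2 (w1.drop s) then some s else mwBloop w1 w2 (s + 1) f
    else none

def merge_words_alt (word1 : String) (word2 : String) : String :=
  let w1 := word1.toList
  let w2 := word2.toList
  match mwBloop w1 w2 (w1.length - w2.length) (w1.length + 1) with
  | some s => String.ofList (w1.take s ++ w2)
  | none =>
    if w1.isEmpty && w2.isEmpty then String.ofList w2
    else ""   -- Python B raises ValueError here; excluded by Pre_

-- ===== PRECONDITION & SPEC =====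
-- Pre_ holds exactly when some suffix/prefix slice comparison of A's loop succeeds (so bir_xil
-- gets bound); on every other input Python A raises NameError at the return statement, and
-- Python B raises its deliberate ValueError on exactly the same inputs.
def Pre_merge_words (word1 : String) (word2 : String) : Prop :=
  ∃ t : Nat, t ≤ min word1.toList.length word2.toList.length ∧
    word1.toList.drop (word1.toList.length - (t + 1)) = word2.toList.take (t + 1)
instance (word1 : String) (word2 : String) : Decidable (Pre_merge_words word1 word2) := by
  unfold Pre_merge_words; infer_instance
def pvWitness_merge_words : String × String := ("ab", "bc")

def Spec_merge_words (word1 : String) (word2 : String) (out : String) : Prop :=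
  out = merge_words_alt word1 word2
instance (word1 : String) (word2 : String) (out : String) : Decidable (Spec_merge_words word1 word2 out) := by
  unfold Spec_merge_words; infer_instance

-- ===== CLAIM (what is proved, stated in full; the proofs are below) =====
def Claim_equal_merge_words : Prop := ∀ (word1 : String) (word2 : String), Dom_merge_words word1 word2 → Pre_merge_words word1 word2 → Spec_merge_words word1 word2 (merge_words word1 word2)

-- ===== LEMMAS AND PROOFS =====

-- the matching predicate of both loops: the length-m suffix of w1 equals the length-m prefix of w2
abbrev mwP (w1 w2 : List Char) (m : Nat) : Prop := w1.drop (w1.length - m) = w2.take m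

lemma mwAloop_eq_foldl (w1 w2 : List Char) (stop : Nat) :
    ∀ (f t : Nat) (bir : Option (List Char)), t + f ≤ stop + 1 →
      mwAloop w1 w2 stop (-((t : Int) + 1)) ((t : Int) + 1) (t : Int) bir f
        = (List.range' t f).foldl
            (fun b u => if w1.drop (w1.length - (u+1)) = w2.take (u+1)
                        then some (w1.drop (w1.length - (u+1))) else b) bir := by
  intro f
  induction f with
  | zero => intro t bir h; simp [mwAloop]
  | succ f ih =>
    intro t bir h
    rw [List.range'_succ]
    have hg : ((t : Int) ≤ (stop : Int)) := by exact_mod_cast Nat.le_of_lt_succ (by omega)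
    have hs1 : PySem.List.slice w1 (some (-((t : Int) + 1))) none = w1.drop (w1.length - (t+1)) := by
      have := PySem.List.slice_from_neg_natCast w1 (k := t+1) (by omega)
      simpa using this
    have hs2 : PySem.List.slice w2 none (some ((t : Int) + 1)) = w2.take (t+1) := by
      have := PySem.List.slice_to_natCast w2 (t+1)
      simpa using this
    have harg1 : -((t : Int) + 1) - 1 = -(((t+1 : Nat) : Int) + 1) := by push_cast; ring
    have harg2 : ((t : Int) + 1) + 1 = (((t+1 : Nat) : Int) + 1) := by push_cast; ring
    have harg3 : ((t : Int) + 1) = ((t+1 : Nat) : Int) := by push_cast; ring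
    rw [mwAloop, if_pos hg, hs1, hs2, harg1, harg2, harg3, ih (t+1) _ (by omega)]
    simp [List.foldl_cons]

lemma mwfoldl_last (w1 w2 : List Char) :
    ∀ (k : Nat) (bir : Option (List Char)), (∃ u, u < k ∧ mwP w1 w2 (u+1)) →
      (List.range' 0 k).foldl
          (fun b u => if w1.drop (w1.length - (u+1)) = w2.take (u+1)
                      then some (w1.drop (w1.length - (u+1))) else b) bir
        = some (w1.drop (w1.length - Nat.findGreatest (mwP w1 w2) k)) := by
  intro k
  induction k with
  | zero => rintro bir ⟨u, hu, _⟩; omega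
  | succ k ih =>
    rintro bir hex
    rw [List.range'_1_concat, List.foldl_append]
    simp only [List.foldl_cons, List.foldl_nil, Nat.zero_add]
    rw [Nat.findGreatest_succ]
    by_cases hP : mwP w1 w2 (k+1)
    · have hP' : w1.drop (w1.length - (k+1)) = w2.take (k+1) := hP
      rw [if_pos hP, if_pos hP']
    · have hP' : ¬ w1.drop (w1.length - (k+1)) = w2.take (k+1) := hP
      rw [if_neg hP, if_neg hP']
      apply ih
      obtain ⟨u, hu, hPu⟩ := hex
      exact ⟨u, by rcases Nat.lt_succ_iff_lt_or_eq.mp hu with h | h; exact h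
                   · exact absurd (h ▸ hPu) hP, hPu⟩

lemma mwBloop_eq (w1 w2 : List Char) :
    ∀ (f s T : Nat), s ≤ T → T < w1.length → T - s < f →
      PySem.Chars.startswith w2 (w1.drop T) = true →
      (∀ u, s ≤ u → u < T → ¬ (PySem.Chars.startswith w2 (w1.drop u) = true)) →
      mwBloop w1 w2 s f = some T := by
  intro f
  induction f with
  | zero => intro s T h1 hTn h2; omega
  | succ f ih =>
    intro s T h1 hTn h2 hT hmin
    rw [mwBloop, if_pos (by omega : s < w1.length)]
    rcases Nat.eq_or_lt_of_le h1 with rfl | hlt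
    · rw [if_pos hT]
    · rw [if_neg (by simpa using hmin s le_rfl hlt)]
      exact ih (s+1) T hlt hTn (by omega) hT (fun u hu1 hu2 => hmin u (by omega) hu2)

lemma mw_startswith_iff (w1 w2 : List Char) (s : Nat) :
    PySem.Chars.startswith w2 (w1.drop s) = true ↔ w1.drop s = w2.take (w1.length - s) := by
  rw [PySem.Chars.startswith_iff, List.prefix_iff_eq_take, List.length_drop]

theorem main (word1 word2 : String)
    (hpre : ∃ t : Nat, t ≤ min word1.toList.length word2.toList.length ∧
      word1.toList.drop (word1.toList.length - (t + 1)) = word2.toList.take (t + 1)) :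
    merge_words word1 word2 = merge_words_alt word1 word2 := by
  obtain ⟨t, ht, hPt⟩ := hpre
  set w1 := word1.toList with hw1
  set w2 := word2.toList with hw2
  set n := w1.length with hn
  set m := w2.length with hm
  set stop := min n m with hstop
  set L := Nat.findGreatest (mwP w1 w2) (stop + 1) with hL
  have hfold := mwAloop_eq_foldl w1 w2 stop (stop + 1) 0 none (by omega)
  norm_num at hfold
  have hlast := mwfoldl_last w1 w2 (stop + 1) none ⟨t, by omega, hPt⟩
  have hA : mwAloop w1 w2 stop (-1) 1 0 none (stop + 1) = some (w1.drop (n - L)) := by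
    rw [hfold, hlast]
  have hstopn : stop ≤ n := by omega
  have hstopm : stop ≤ m := by omega
  by_cases hE : mwP w1 w2 (stop + 1)
  · -- degenerate top case: forces w1 = w2
    have hE' : w1.drop (n - (stop + 1)) = w2.take (stop + 1) := hE
    have hlen := congrArg List.length hE'
    simp only [List.length_drop, List.length_take] at hlen
    have hmn : m = n := by omega
    have heq : w1 = w2 := by
      have h0 : n - (stop + 1) = 0 := by omega
      have h2 : w2.take (stop + 1) = w2 := List.take_of_length_le (by omega)
      rw [h0, List.drop_zero, h2] at hE'
      exact hE'
    have hLv : L = stop + 1 := by rw [hL, Nat.findGreatest_succ, if_pos hE]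
    have hbir : w1.drop (n - L) = w1 := by
      have h0 : n - L = 0 := by omega
      rw [h0, List.drop_zero]
    rcases Nat.eq_zero_or_pos n with hn0 | hnpos
    · -- both words are empty: A returns "" and B takes its final `return word2` branch
      have h1 : word1.toList = [] := by rw [← hw1]; exact List.length_eq_zero_iff.mp (by omega)
      have h2 : word2.toList = [] := by rw [← hw2]; exact List.length_eq_zero_iff.mp (by omega)
      have hword1 : word1 = "" := by have := congrArg String.ofList h1; simpa using this
      have hword2 : word2 = "" := by have := congrArg String.ofList h2; simpa using this
      subst hword1; subst hword2
      decide
    · have hB : mwBloop w1 w2 (n - m) (n + 1) = some 0 := by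
        have h0 : n - m = 0 := by omega
        rw [h0, mwBloop, if_pos (show 0 < w1.length by omega),
          if_pos (by rw [PySem.Chars.startswith_iff, List.drop_zero, heq])]
      simp only [merge_words, merge_words_alt, ← hw1, ← hw2, ← hn, ← hm, ← hstop]
      rw [hA, hB]
      have key : String.ofList (PySem.List.slice w1 none (some ((n : Int) - ((w1.drop (n - L)).length : Int)))
          ++ (w1.drop (n - L)) ++ PySem.List.slice w2 (some (((w1.drop (n - L)).length : Int))) none)
          = String.ofList (w1.take 0 ++ w2) := by
        rw [hbir]
        have e1 : ((n : Int) - ((w1.length : Int))) = ((0 : Nat) : Int) := by omega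
        have e2 : ((w1.length : Int)) = ((n : Nat) : Int) := by omega
        rw [e1, e2, PySem.List.slice_to_natCast, PySem.List.slice_from_natCast]
        have e3 : w2.drop n = [] := List.drop_of_length_le (by omega)
        simp [e3, heq]
      exact key
  · -- main case: L ≤ stop
    have hLle : L ≤ stop := by
      rw [hL, Nat.findGreatest_succ, if_neg hE]; exact Nat.findGreatest_le stop
    have hfg := Nat.le_findGreatest (P := mwP w1 w2) (show t + 1 ≤ stop + 1 by omega) hPt
    have hL1 : 1 ≤ L := by omega
    have hPL : mwP w1 w2 L := Nat.findGreatest_spec (P := mwP w1 w2) (m := t + 1) (n := stop + 1) (by omega) hPt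
    have hLn : L ≤ n := by omega
    have hLm : L ≤ m := by omega
    have hB : mwBloop w1 w2 (n - m) (n + 1) = some (n - L) := by
      apply mwBloop_eq w1 w2 (n + 1) (n - m) (n - L) (by omega) (by omega) (by omega)
      · rw [mw_startswith_iff, show w1.length - (n - L) = L by omega]
        exact hPL
      · intro u hu1 hu2 hQ
        rw [mw_startswith_iff] at hQ
        have hPm : mwP w1 w2 (n - u) := by
          rw [mwP, show w1.length - (n - u) = u by omega]
          exact hQ
        exact Nat.findGreatest_is_greatest (n := stop + 1) (by omega : L < n - u) (by omega : n - u ≤ stop + 1) hPm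
    simp only [merge_words, merge_words_alt, ← hw1, ← hw2, ← hn, ← hm, ← hstop]
    rw [hA, hB]
    have hblen : (w1.drop (n - L)).length = L := by rw [List.length_drop]; omega
    have key : String.ofList (PySem.List.slice w1 none (some ((n : Int) - ((w1.drop (n - L)).length : Int)))
        ++ (w1.drop (n - L)) ++ PySem.List.slice w2 (some (((w1.drop (n - L)).length : Int))) none)
        = String.ofList (w1.take (n - L) ++ w2) := by
      rw [hblen]
      have e1 : ((n : Int) - (L : Int)) = (((n - L : Nat)) : Int) := by omega
      rw [e1, PySem.List.slice_to_natCast, PySem.List.slice_from_natCast]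
      have hbir : w1.drop (n - L) = w2.take L := hPL
      rw [hbir, List.append_assoc, List.take_append_drop]
    exact key

-- ===== VERDICT (by name: the statement is the Claim_ definition above) =====
theorem merge_words_spec : Claim_equal_merge_words := by
  intro word1 word2 _ hpre
  unfold Spec_merge_words
  exact main word1 word2 hpre
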